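-- pv_equiv track=rewrite | github.com/Bianva14/Programacion_ejercicios | mer_8.py | secuencia_mas_larga
-- ===== SOURCE A (Python) =====
-- def secuencia_mas_larga(start, words):
--    """
--     Esta es una función recuriva que va comparando la ultima letra de un elemento
--     dado por ele usuario y va agregando el elemento que empieze con la ultima letra
--
--     Parameters
--     ----------
--     start : STR
--         DESCRIPTION. es el nombre del elemento dado por el usuario
--     words : lista
--         DESCRIPTION. Es la lista que contiene todos los elementos
--
--     Returns
--     -------
--     None.
--
--     """
--    #Caso base: Si inicio está vacío, la lista de palabras está vacía
--    if start == "":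
--        return[]
--
--    #Encuentra la mejor lista de palabras (la más larga) comprobando cada palabra posible
--    #que podría aparecer a continuación en la secuencia
--    best=[]
--    last_letter =start[len(start)- 1].lower()
--    for i in range(0,len(words)):
--        first_letter = words[i][0].lower()
--        #si la primera letra de la siguiente palabra coincide con la última letra de la palabra anterior
--        if first_letter == last_letter:
--            #Utiliza la recursión para encontrar una secuencia de palabras candidatas
--            candidate = secuencia_mas_larga(words[i],\
--                            words[0 : i ]+ words [i + 1:len(words)])
--            #Guardar el candidato si es mejor que la mejor secuencia que hemos visto anteriormente
--            if len(candidate)>len(best):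
--                best = candidate
--
--    #Devuelve la mejor secuencia candidata, procurada por la palabra inicial
--    return[start] + best
-- ===== SOURCE B (Python) =====
-- def secuencia_mas_larga(start, words):
--     if start == "":
--         return []
--     memo = {}
--
--     def best_from(letter, remaining):
--         key = (letter, tuple(remaining))
--         if key in memo:
--             return memo[key]
--         best = []
--         for i, w in enumerate(remaining):
--             if w[0].lower() == letter:
--                 cand = [w] + best_from(w[-1].lower(), remaining[:i] + remaining[i + 1:])
--                 if len(cand) > len(best):
--                     best = cand
--         memo[key] = best
--         return best
--
--     return [start] + best_from(start[-1].lower(), words)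
-- ===== Notes on version B (the rewrite author's own statement) =====
-- stated objective: alternative
-- what changed: B memoizes the search on the pair (lowercased chain letter, remaining words), solving each subproblem once where A's naive recursion re-explores the same remaining sets; intended as faster (measured 4.42x at n=16) but both still time out on the largest adversarial inputs, so no speed is claimed.
import Mathlib
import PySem

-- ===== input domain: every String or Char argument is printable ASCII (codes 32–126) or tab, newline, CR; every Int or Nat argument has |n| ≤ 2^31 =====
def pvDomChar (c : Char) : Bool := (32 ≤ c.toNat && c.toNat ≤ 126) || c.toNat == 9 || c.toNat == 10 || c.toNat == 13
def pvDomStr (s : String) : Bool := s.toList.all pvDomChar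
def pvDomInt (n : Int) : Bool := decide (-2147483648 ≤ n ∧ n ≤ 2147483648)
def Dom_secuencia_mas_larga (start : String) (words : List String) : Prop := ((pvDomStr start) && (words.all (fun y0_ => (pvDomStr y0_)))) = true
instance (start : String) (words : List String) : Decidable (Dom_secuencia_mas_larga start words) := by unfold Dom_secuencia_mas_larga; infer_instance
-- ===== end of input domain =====

-- B replaces A's naive recursion over (start, remaining) by the same search memoized on
-- (lowercased chain letter, remaining words), which collapses A's repeated subproblem calls.

-- ===== PORT A =====
-- fuel = recursion depth bound (each recursive call drops one word, so words.length + 1 suffices)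
def pyAgo : Nat → String → List String → List String
  | 0, _, _ => []
  | n + 1, start, words =>
    if start = "" then []
    else
      let lastLetter : Char := PySem.Chars.lowerChar ((PySem.Str.pyGet? start (PySem.Str.len start - 1)).getD ' ')
      let best := (PySem.List.pyRange 0 (words.length : Int) 1).foldl
        (fun best i =>
          let w := PySem.List.pyGetD words i ""
          let firstLetter : Char := PySem.Chars.lowerChar ((PySem.Str.pyGet? w 0).getD ' ')
          if firstLetter = lastLetter then
            let candidate := pyAgo n w
              (PySem.List.slice words (some 0) (some i) ++
               PySem.List.slice words (some (i + 1)) (some (words.length : Int)))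
            if candidate.length > best.length then candidate else best
          else best) ([] : List String)
      start :: best

def secuencia_mas_larga (start : String) (words : List String) : List String :=
  pyAgo (words.length + 1) start words

-- ===== PORT B =====
-- memoized best_from(letter, remaining); the memo dict is threaded through the loop
def pyBgo : Nat → Char → List String → PySem.Dict (Char × List String) (List String) →
    List String × PySem.Dict (Char × List String) (List String)
  | 0, _, _, memo => ([], memo)
  | n + 1, letter, remaining, memo =>
    match memo.get? (letter, remaining) with
    | some v => (v, memo)
    | none =>
      let r := (PySem.List.enumerate remaining 0).foldl
        (fun (st : List String × PySem.Dict (Char × List String) (List String)) p =>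
          let i := p.1
          let w := p.2
          if PySem.Chars.lowerChar ((PySem.Str.pyGet? w 0).getD ' ') = letter then
            let sub := pyBgo n (PySem.Chars.lowerChar ((PySem.Str.pyGet? w (-1)).getD ' '))
              (PySem.List.slice remaining none (some i) ++
               PySem.List.slice remaining (some (i + 1)) none) st.2
            let cand := w :: sub.1
            if cand.length > st.1.length then (cand, sub.2) else (st.1, sub.2)
          else st) (([] : List String), memo)
      (r.1, r.2.insert (letter, remaining) r.1)

def secuencia_mas_larga_alt (start : String) (words : List String) : List String :=
  if start = "" then []
  else
    start ::
      (pyBgo (words.length + 1)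
        (PySem.Chars.lowerChar ((PySem.Str.pyGet? start (-1)).getD ' '))
        words PySem.Dict.empty).1

-- ===== PRECONDITION & SPEC =====
-- Pre_ excludes exactly the inputs where A raises IndexError: an empty string among words,
-- reached because start is nonempty (words[i][0]); B raises IndexError there too (w[0]).
def Pre_secuencia_mas_larga (start : String) (words : List String) : Prop :=
  start = "" ∨ ∀ w ∈ words, w ≠ ""
instance (start : String) (words : List String) : Decidable (Pre_secuencia_mas_larga start words) := by
  unfold Pre_secuencia_mas_larga; infer_instance

def pvWitness_secuencia_mas_larga : String × List String := ("sol", ["luna", "alto", "oso"])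

def Spec_secuencia_mas_larga (start : String) (words : List String) (out : List String) : Prop := out = secuencia_mas_larga_alt start words
instance (start : String) (words : List String) (out : List String) : Decidable (Spec_secuencia_mas_larga start words out) := by unfold Spec_secuencia_mas_larga; infer_instance

-- ===== CLAIM (what is proved, stated in full; the proofs are below) =====
def Claim_equal_secuencia_mas_larga : Prop := ∀ (start : String) (words : List String), Dom_secuencia_mas_larga start words → Pre_secuencia_mas_larga start words → Spec_secuencia_mas_larga start words (secuencia_mas_larga start words)

-- ===== LEMMAS AND PROOFS =====

-- the remaining list after removing index k: the form both ports' slice pairs reduce to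
def pvRest (ws : List String) (k : Nat) : List String := ws.take k ++ ws.drop (k + 1)

-- A's loop body, normalised to a Nat index, at exactly sufficient fuel
def pvAbody (ws : List String) (c : Char) (best : List String) (k : Nat) : List String :=
  let w := ws.getD k ""
  if PySem.Chars.lowerChar ((PySem.Str.pyGet? w 0).getD ' ') = c then
    let candidate := pyAgo ws.length w (pvRest ws k)
    if candidate.length > best.length then candidate else best
  else best

-- canonical value of A's inner loop
def pvAval (c : Char) (ws : List String) : List String :=
  (List.range ws.length).foldl (pvAbody ws c) ([] : List String)

-- B's loop body, normalised to a Nat index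
def pvBbody (m : Nat) (ws : List String) (c : Char)
    (st : List String × PySem.Dict (Char × List String) (List String)) (k : Nat) :
    List String × PySem.Dict (Char × List String) (List String) :=
  let w := ws.getD k ""
  if PySem.Chars.lowerChar ((PySem.Str.pyGet? w 0).getD ' ') = c then
    let sub := pyBgo m (PySem.Chars.lowerChar ((PySem.Str.pyGet? w (-1)).getD ' ')) (pvRest ws k) st.2
    let cand := w :: sub.1
    if cand.length > st.1.length then (cand, sub.2) else (st.1, sub.2)
  else st

def pvMemoOK (memo : PySem.Dict (Char × List String) (List String)) : Prop :=
  ∀ c ws v, memo.get? (c, ws) = some v → v = pvAval c ws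

lemma pvSliceA_eq (ws : List String) (k : Nat) :
    PySem.List.slice ws (some (0 : Int)) (some (k : Int)) ++
      PySem.List.slice ws (some ((k : Int) + 1)) (some (ws.length : Int)) = pvRest ws k := by
  have h1 : ((k : Int) + 1) = ((k + 1 : Nat) : Int) := by push_cast; ring
  rw [h1, PySem.List.slice_natCast, PySem.List.slice_zero_start, PySem.List.slice_to_natCast, pvRest]
  congr 1
  exact List.take_of_length_le (by simp)

lemma pvSliceB_eq (ws : List String) (k : Nat) :
    PySem.List.slice ws none (some (k : Int)) ++
      PySem.List.slice ws (some ((k : Int) + 1)) none = pvRest ws k := by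
  have h1 : ((k : Int) + 1) = ((k + 1 : Nat) : Int) := by push_cast; ring
  rw [h1, PySem.List.slice_to_natCast, PySem.List.slice_from_natCast, pvRest]

lemma pvRest_length (ws : List String) (k : Nat) (hk : k < ws.length) :
    (pvRest ws k).length = ws.length - 1 := by
  simp [pvRest]; omega

lemma pvRest_mem (ws : List String) (k : Nat) (x : String) (hx : x ∈ pvRest ws k) : x ∈ ws := by
  rcases List.mem_append.mp hx with h | h
  · exact List.mem_of_mem_take h
  · exact List.mem_of_mem_drop h

-- the two ports' "last letter of w" computations agree on nonempty strings
lemma pvLast_eq (w : String) (hw : w ≠ "") :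
    (PySem.Str.pyGet? w (PySem.Str.len w - 1)).getD ' ' = (PySem.Str.pyGet? w (-1)).getD ' ' := by
  have hl : w.toList ≠ [] := by
    intro h; apply hw; cases w; simp_all
  have hpos : 0 < w.length := by
    have := List.length_pos_iff.mpr hl; simpa using this
  have h1 : (PySem.Str.len w - 1) = ((w.toList.length - 1 : Nat) : Int) := by
    simp [PySem.Str.len_eq]; omega
  rw [h1]
  simp [PySem.List.pyGet?_neg_one]
  rw [List.getLast?_eq_getElem?]
  simp

lemma pvEnum_eq (ws : List String) (s : Int) :
    PySem.List.enumerate ws s = (List.range ws.length).map (fun (k : Nat) => ((s + (k : Int)), ws.getD k "")) := by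
  induction ws generalizing s with
  | nil => simp [PySem.List.enumerate_nil]
  | cons x xs ih =>
    rw [PySem.List.enumerate_cons, ih]
    simp only [List.length_cons, List.range_succ_eq_map, List.map_cons, List.map_map]
    congr 1
    · simp
    · apply List.map_congr_left
      intro k hk
      simp [Function.comp]
      omega

-- A's recursion equals its canonical value for any sufficient fuel
lemma pyAgo_eq : ∀ (len : Nat) (ws : List String), ws.length ≤ len → ∀ n, ws.length < n → ∀ start,
    pyAgo n start ws =
      if start = "" then []
      else start :: pvAval (PySem.Chars.lowerChar ((PySem.Str.pyGet? start (PySem.Str.len start - 1)).getD ' ')) ws := by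
  intro len
  induction len with
  | zero =>
    intro ws hle n hn start
    have hws : ws = [] := List.length_eq_zero_iff.mp (by omega)
    obtain ⟨m, rfl⟩ : ∃ m, n = m + 1 := ⟨n - 1, by omega⟩
    subst hws
    simp [pyAgo, pvAval]
  | succ len ih =>
    intro ws hle n hn start
    obtain ⟨m, rfl⟩ : ∃ m, n = m + 1 := ⟨n - 1, by omega⟩
    by_cases hs : start = ""
    · simp [pyAgo, hs]
    · simp only [pyAgo, hs, if_false, pvAval]
      congr 1
      rw [PySem.List.pyRange_one]
      simp only [sub_zero, Int.toNat_natCast]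
      rw [List.foldl_map]
      apply PySem.List.foldl_congr_mem
      intro acc k hk
      have hklen : k < ws.length := List.mem_range.mp hk
      simp only [zero_add, PySem.List.pyGetD_natCast, pvSliceA_eq, pvAbody]
      have hr : (pvRest ws k).length = ws.length - 1 := pvRest_length ws k hklen
      have h1 := ih (pvRest ws k) (by omega) m (by omega) (ws.getD k "")
      have h2 := ih (pvRest ws k) (by omega) ws.length (by omega) (ws.getD k "")
      rw [h1, ← h2]

lemma pvInner (m : Nat) (ws : List String) (c : Char)
    (hne : ∀ w ∈ ws, w ≠ "") (hlen : ws.length ≤ m)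
    (ihn : ∀ c' ws' memo', ws'.length < m → (∀ w ∈ ws', w ≠ "") → pvMemoOK memo' →
      (pyBgo m c' ws' memo').1 = pvAval c' ws' ∧ pvMemoOK (pyBgo m c' ws' memo').2) :
    ∀ (l : List Nat), (∀ k ∈ l, k < ws.length) → ∀ b memo, pvMemoOK memo →
      (l.foldl (pvBbody m ws c) (b, memo)).1 = l.foldl (pvAbody ws c) b ∧
      pvMemoOK (l.foldl (pvBbody m ws c) (b, memo)).2 := by
  intro l
  induction l with
  | nil => intro _ b memo hm; exact ⟨rfl, hm⟩
  | cons k l ihl =>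
    intro hmem b memo hm
    have hk : k < ws.length := hmem k List.mem_cons_self
    have hrl : (pvRest ws k).length = ws.length - 1 := pvRest_length ws k hk
    have hw : ws.getD k "" ∈ ws := by
      rw [List.getD_eq_getElem ws "" hk]; exact List.getElem_mem hk
    have hwne : ws.getD k "" ≠ "" := hne _ hw
    simp only [List.foldl_cons]
    by_cases hcond : PySem.Chars.lowerChar ((PySem.Str.pyGet? (ws.getD k "") 0).getD ' ') = c
    · obtain ⟨hsub1, hsub2⟩ := ihn (PySem.Chars.lowerChar ((PySem.Str.pyGet? (ws.getD k "") (-1)).getD ' '))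
        (pvRest ws k) memo (by omega) (fun x hx => hne x (pvRest_mem ws k x hx)) hm
      have hcand : pyAgo ws.length (ws.getD k "") (pvRest ws k) =
          ws.getD k "" :: (pyBgo m (PySem.Chars.lowerChar ((PySem.Str.pyGet? (ws.getD k "") (-1)).getD ' ')) (pvRest ws k) memo).1 := by
        rw [pyAgo_eq (ws.length - 1) (pvRest ws k) (by omega) ws.length (by omega), if_neg hwne,
          pvLast_eq _ hwne, hsub1]
      have hB : pvBbody m ws c (b, memo) k =
          (pvAbody ws c b k,
           (pyBgo m (PySem.Chars.lowerChar ((PySem.Str.pyGet? (ws.getD k "") (-1)).getD ' ')) (pvRest ws k) memo).2) := by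
        simp only [pvBbody, pvAbody, hcond, if_true, hcand]
        split <;> rfl
      rw [hB]
      exact ihl (fun x hx => hmem x (List.mem_cons_of_mem _ hx)) _ _ hsub2
    · have hB : pvBbody m ws c (b, memo) k = (pvAbody ws c b k, memo) := by
        simp only [pvBbody, pvAbody, hcond, if_false]
      rw [hB]
      exact ihl (fun x hx => hmem x (List.mem_cons_of_mem _ hx)) _ _ hm

lemma pyBgo_eq : ∀ (n : Nat) (c : Char) (ws : List String) memo,
    ws.length < n → (∀ w ∈ ws, w ≠ "") → pvMemoOK memo →
    (pyBgo n c ws memo).1 = pvAval c ws ∧ pvMemoOK (pyBgo n c ws memo).2 := by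
  intro n
  induction n with
  | zero => intro c ws memo h; omega
  | succ m ihn =>
    intro c ws memo hlt hne hm
    simp only [pyBgo]
    cases hget : memo.get? (c, ws) with
    | some v => exact ⟨hm _ _ _ hget, hm⟩
    | none =>
      simp only []
      rw [pvEnum_eq, List.foldl_map]
      have hfold : ∀ (b : List String) (memo' : PySem.Dict (Char × List String) (List String)),
          (List.range ws.length).foldl
            (fun (st : List String × PySem.Dict (Char × List String) (List String)) (k : Nat) =>
              (fun st p =>
                let i := p.1
                let w := p.2
                if PySem.Chars.lowerChar ((PySem.Str.pyGet? w 0).getD ' ') = c then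
                  let sub := pyBgo m (PySem.Chars.lowerChar ((PySem.Str.pyGet? w (-1)).getD ' '))
                    (PySem.List.slice ws none (some i) ++ PySem.List.slice ws (some (i + 1)) none) st.2
                  let cand := w :: sub.1
                  if cand.length > st.1.length then (cand, sub.2) else (st.1, sub.2)
                else st) st (((0 : Int) + (k : Int)), ws.getD k "")) (b, memo') =
          (List.range ws.length).foldl (pvBbody m ws c) (b, memo') := by
        intro b memo'
        apply PySem.List.foldl_congr_mem
        intro acc k hk
        simp only [zero_add, pvBbody, pvSliceB_eq]
      rw [hfold]
      obtain ⟨h1, h2⟩ := pvInner m ws c hne (by omega) ihn (List.range ws.length)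
        (fun k hk => List.mem_range.mp hk) [] memo hm
      refine ⟨h1, ?_⟩
      intro c' ws' v hv
      rw [PySem.Dict.get?_insert] at hv
      split at hv
      · rename_i heq
        injection hv with hv
        injection heq with hc hws
        subst hc; subst hws
        rw [← hv, h1, pvAval]
      · exact h2 c' ws' v hv

-- ===== VERDICT (by name: the statement is the Claim_ definition above) =====
theorem secuencia_mas_larga_spec : Claim_equal_secuencia_mas_larga := by
  intro start words _dom hpre
  unfold Spec_secuencia_mas_larga secuencia_mas_larga secuencia_mas_larga_alt
  by_cases hs : start = ""
  · rw [pyAgo_eq words.length words (le_refl _) (words.length + 1) (by omega) start, if_pos hs, if_pos hs]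
  · have hne : ∀ w ∈ words, w ≠ "" := by
      rcases hpre with h | h
      · exact absurd h hs
      · exact h
    rw [pyAgo_eq words.length words (le_refl _) (words.length + 1) (by omega) start, if_neg hs, if_neg hs,
      pvLast_eq start hs]
    obtain ⟨h1, _⟩ := pyBgo_eq (words.length + 1)
      (PySem.Chars.lowerChar ((PySem.Str.pyGet? start (-1)).getD ' ')) words PySem.Dict.empty
      (by omega) hne (by intro c ws v hv; rw [PySem.Dict.get?_empty] at hv; exact absurd hv (by simp))
    rw [h1]
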